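-- pv_equiv track=rewrite | github.com/nulldays/advent_of_code | 2015/day1/day1.py | part_two
-- ===== SOURCE A (Python) =====
-- def part_two(inp):
--     current_floor = 0
--     basement = 0
--
--     for i, move in enumerate(inp):
--         if move == '(':
--             current_floor += 1
--         elif move == ')':
--             current_floor -= 1
--
--         if current_floor == -1 and basement == 0:
--             basement = i + 1
--             return basement
-- ===== SOURCE B (Python) =====
-- DELTA = {'(': 1, ')': -1}
--
-- def part_two(inp):
--     # Pass 1: build the full list of running floor totals.
--     totals = []
--     t = 0
--     for c in inp:
--         t += DELTA.get(c, 0)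
--         totals.append(t)
--     # Pass 2: the answer is the position of the first -1, if any.
--     if -1 in totals:
--         return totals.index(-1) + 1
--     return None
-- ===== Notes on version B (the rewrite author's own statement) =====
-- stated objective: alternative
-- what changed: Replaces the single stateful scan with early return by a two-phase pipeline: first build the complete prefix-sum list of floor totals (deltas from a dict), then locate the first -1 with list.index.
import Mathlib
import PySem

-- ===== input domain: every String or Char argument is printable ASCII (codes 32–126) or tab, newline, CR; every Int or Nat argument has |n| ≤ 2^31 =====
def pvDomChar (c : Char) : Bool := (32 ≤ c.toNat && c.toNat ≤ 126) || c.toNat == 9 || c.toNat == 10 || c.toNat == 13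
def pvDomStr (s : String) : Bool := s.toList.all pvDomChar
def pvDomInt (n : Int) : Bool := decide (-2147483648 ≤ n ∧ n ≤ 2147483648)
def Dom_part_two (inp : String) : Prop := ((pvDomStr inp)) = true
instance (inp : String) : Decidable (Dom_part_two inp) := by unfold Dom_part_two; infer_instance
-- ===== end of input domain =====

-- B replaces A's single stateful scan-with-early-return by a two-phase pipeline:
-- build the full prefix-sum list of floor totals, then find the first -1 with list.index.


-- ===== PORT A =====
-- A's for-loop over enumerate(inp); `basement` is 0 until the return statement, so the
-- `basement == 0` conjunct is always true and the loop returns at the first floor of -1.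
def partTwoGo : List Char → Int → Nat → Option Int
  | [], _, _ => none
  | move :: rest, current_floor, i =>
    let cf := if move = '(' then current_floor + 1
              else if move = ')' then current_floor - 1
              else current_floor
    if cf = -1 then some ((i : Int) + 1) else partTwoGo rest cf (i + 1)

def part_two (inp : String) : Option Int := partTwoGo inp.toList 0 0

-- ===== PORT B =====
-- the module-level dict DELTA = {'(': 1, ')': -1}
def pvDELTA : PySem.Dict Char Int := (PySem.Dict.empty.insert '(' 1).insert ')' (-1)

-- Pass 1 of B: the loop building the list of running totals (loop state = (totals, t)).
def pvBuildTotals (l : List Char) : List Int :=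
  (l.foldl (fun (p : List Int × Int) c =>
      let t := p.2 + PySem.Dict.getD pvDELTA c 0
      (p.1 ++ [t], t)) ([], 0)).1

def part_two_alt (inp : String) : Option Int :=
  let totals := pvBuildTotals inp.toList
  -- Pass 2: `-1 in totals` then `totals.index(-1) + 1`, else None.
  if (-1 : Int) ∈ totals then
    (PySem.List.index? totals (-1)).map (fun (j : Nat) => ((j : Int) + 1))
  else none

-- ===== PRECONDITION & SPEC =====
def Spec_part_two (inp : String) (out : Option Int) : Prop := out = part_two_alt inp
instance (inp : String) (out : Option Int) : Decidable (Spec_part_two inp out) := by unfold Spec_part_two; infer_instance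

-- ===== CLAIM (what is proved, stated in full; the proofs are below) =====
def Claim_equal_part_two : Prop := ∀ (inp : String), Dom_part_two inp → Spec_part_two inp (part_two inp)

-- ===== LEMMAS AND PROOFS =====

/-- The list of running totals starting from floor `t`. -/
def pvScan : Int → List Char → List Int
  | _, [] => []
  | t, c :: cs =>
    let t' := t + PySem.Dict.getD pvDELTA c 0
    t' :: pvScan t' cs

theorem pvScan_cons (t : Int) (c : Char) (cs : List Char) :
    pvScan t (c :: cs) =
      (t + PySem.Dict.getD pvDELTA c 0) :: pvScan (t + PySem.Dict.getD pvDELTA c 0) cs := rfl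

/-- The dict lookup agrees with A's branch cascade. -/
theorem delta_eq (c : Char) :
    PySem.Dict.getD pvDELTA c 0 = (if c = '(' then 1 else if c = ')' then -1 else 0) := by
  unfold pvDELTA
  rw [PySem.Dict.getD_insert, PySem.Dict.getD_insert]
  split_ifs with h1 h2 h3 <;> first | rfl | (exact absurd h1 (by simp [h2]))

/-- B's foldl builds exactly `acc ++ pvScan t l` as its first component. -/
theorem foldl_fst (l : List Char) (acc : List Int) (t : Int) :
    (l.foldl (fun (p : List Int × Int) c =>
      let t := p.2 + PySem.Dict.getD pvDELTA c 0
      (p.1 ++ [t], t)) (acc, t)).1 = acc ++ pvScan t l := by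
  induction l generalizing acc t with
  | nil => simp [pvScan]
  | cons c cs ih =>
    simp only [List.foldl_cons, pvScan_cons]
    rw [ih]
    simp

theorem buildTotals_eq (l : List Char) : pvBuildTotals l = pvScan 0 l := by
  unfold pvBuildTotals
  rw [foldl_fst]
  simp

/-- A's loop returns the (shifted) index of the first `-1` in the totals of the remaining input. -/
theorem go_eq_index (l : List Char) (t : Int) (i : Nat) :
    partTwoGo l t i =
      (PySem.List.index? (pvScan t l) (-1)).map (fun (j : Nat) => ((i : Int) + (j : Int) + 1)) := by
  induction l generalizing t i with
  | nil => simp [partTwoGo, pvScan, PySem.List.index?]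
  | cons c cs ih =>
    rw [pvScan_cons]
    have hd : (if c = '(' then t + 1 else if c = ')' then t - 1 else t)
        = t + PySem.Dict.getD pvDELTA c 0 := by
      rw [delta_eq]; split_ifs <;> ring
    show (if (if c = '(' then t + 1 else if c = ')' then t - 1 else t) = -1
            then some ((i : Int) + 1)
            else partTwoGo cs (if c = '(' then t + 1 else if c = ')' then t - 1 else t) (i + 1)) = _
    rw [hd]
    by_cases h : t + PySem.Dict.getD pvDELTA c 0 = -1
    · rw [if_pos h, h, PySem.List.index?_cons_self]
      simp
    · rw [if_neg h, ih,
        PySem.List.index?_cons_of_ne _ h, Option.map_map]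
      cases PySem.List.index? (pvScan (t + PySem.Dict.getD pvDELTA c 0) cs) (-1) with
      | none => rfl
      | some j => simp [Function.comp]; ring

-- ===== VERDICT (by name: the statement is the Claim_ definition above) =====
theorem part_two_spec : Claim_equal_part_two := by
  intro inp _
  show part_two inp = part_two_alt inp
  unfold part_two part_two_alt
  rw [go_eq_index, buildTotals_eq]
  by_cases h : (-1 : Int) ∈ pvScan 0 inp.toList
  · rw [if_pos h]
    cases PySem.List.index? (pvScan 0 inp.toList) (-1) with
    | none => rfl
    | some j => simp
  · rw [if_neg h, (PySem.List.index?_eq_none_iff _ _).mpr h]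
    rfl
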